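-- pv_equiv track=rewrite | github.com/yjmantilla/sovabids | sovabids/misc.py | flat_paren_counter
-- ===== SOURCE A (Python) =====
-- def flat_paren_counter(string):
--     """Count the number of non-nested balanced parentheses in the string. If parenthesis is not balanced then return -1.
--
--     Parameters
--     ----------
--
--     string : str
--         The string we will inspect for balanced parentheses.
--
--     Returns
--     -------
--
--     int :
--         The number of non-nested balanced parentheses or -1 if the string has unbalanced parentheses.
--     """
--     #Modified from
--     #jeremy radcliff
--     #https://codereview.stackexchange.com/questions/153078/balanced-parentheses-checker-in-python
--     counter = 0
--     times = 0
--     inside = False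
--     for c in string:
--         if not inside and c == '(':
--             counter += 1
--             inside = True
--         elif inside and c == ')':
--             counter -= 1
--             times +=1
--             inside = False
--         if counter < 0:
--             return -1
--
--     if counter == 0:
--         return times
--     return -1
-- ===== SOURCE B (Python) =====
-- def flat_paren_counter(string):
--     times = 0
--     i = 0
--     n = len(string)
--     while i < n:
--         if string[i] == '(':
--             j = string.find(')', i + 1)
--             if j == -1:
--                 return -1
--             times += 1
--             i = j + 1
--         else:
--             i += 1
--     return times
-- ===== Notes on version B (the rewrite author's own statement) =====
-- stated objective: alternative
-- what changed: Replaced A's per-character state machine with a counter, a times accumulator and an inside flag by an index loop that, at each opening parenthesis, jumps directly past the next closing one via str.find (returning -1 when there is none), so no flag or counter is maintained.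
import Mathlib
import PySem

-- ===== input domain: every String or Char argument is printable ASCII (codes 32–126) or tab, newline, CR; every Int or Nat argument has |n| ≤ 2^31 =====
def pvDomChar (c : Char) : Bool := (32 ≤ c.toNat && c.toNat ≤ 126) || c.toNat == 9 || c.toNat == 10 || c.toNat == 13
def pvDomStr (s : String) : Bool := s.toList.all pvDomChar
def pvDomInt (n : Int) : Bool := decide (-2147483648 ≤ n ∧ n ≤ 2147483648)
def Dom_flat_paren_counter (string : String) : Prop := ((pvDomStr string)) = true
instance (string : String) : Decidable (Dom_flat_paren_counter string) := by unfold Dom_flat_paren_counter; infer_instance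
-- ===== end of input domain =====

-- B replaces A's char-by-char flag/counter state machine with a skip-to-next-')' scan (str.find);
-- objective: alternative decomposition, same asymptotic cost. Proven equal on all inputs (A is total).

-- ===== PORT A =====
-- A's loop over the characters with state (counter, times, inside); the trailing
-- 'if counter < 0: return -1' early return is kept verbatim.
def pvLoopA : List Char → Int → Int → Bool → Int
  | [], counter, times, _ => if counter = 0 then times else -1
  | c :: rest, counter, times, inside =>
    let s :=
      if !inside && c = '(' then (counter + 1, times, true)
      else if inside && c = ')' then (counter - 1, times + 1, false)
      else (counter, times, inside)
    if s.1 < 0 then -1 else pvLoopA rest s.1 s.2.1 s.2.2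

def flat_paren_counter (string : String) : Int :=
  pvLoopA string.toList 0 0 false

-- ===== PORT B =====
-- B's 'string.find(')', i+1)' jump: drop everything up to and past the next ')'.
def pvAfterClose : List Char → Option (List Char)
  | [] => none
  | c :: rest => if c = ')' then some rest else pvAfterClose rest

theorem pvAfterClose_length : ∀ (l r : List Char), pvAfterClose l = some r → r.length < l.length := by
  intro l
  induction l with
  | nil => intro r h; simp [pvAfterClose] at h
  | cons c rest ih =>
    intro r h
    simp only [pvAfterClose] at h
    split at h
    · cases h; simp
    · have := ih r h; simp; omega

-- B's index loop: on '(' return -1 if no ')' follows, else count it and resume after that ')'.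
def pvLoopB (l : List Char) (times : Int) : Int :=
  match l with
  | [] => times
  | c :: rest =>
    if c = '(' then
      match h2 : pvAfterClose rest with
      | none => -1
      | some rest' => pvLoopB rest' (times + 1)
    else pvLoopB rest times
termination_by l.length
decreasing_by
  · have := pvAfterClose_length rest rest' h2; simp; omega
  · simp

def flat_paren_counter_alt (string : String) : Int :=
  pvLoopB string.toList 0

-- ===== PRECONDITION & SPEC =====
def Spec_flat_paren_counter (string : String) (out : Int) : Prop := out = flat_paren_counter_alt string
instance (string : String) (out : Int) : Decidable (Spec_flat_paren_counter string out) := by unfold Spec_flat_paren_counter; infer_instance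

-- ===== CLAIM (what is proved, stated in full; the proofs are below) =====
def Claim_equal_flat_paren_counter : Prop := ∀ (string : String), Dom_flat_paren_counter string → Spec_flat_paren_counter string (flat_paren_counter string)

-- ===== LEMMAS AND PROOFS =====

theorem pvLoopB_cons_open (rest : List Char) (t : Int) :
    pvLoopB ('(' :: rest) t =
      match pvAfterClose rest with
      | none => -1
      | some r => pvLoopB r (t + 1) := by
  rw [pvLoopB]
  norm_num
  split <;> rename_i h <;> simp [h]

-- Joint invariant: outside a pair A's state is (0, t, false) and agrees with pvLoopB;
-- inside a pair it is (1, t, true) and agrees with the skip-to-')' continuation.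
theorem pvLoop_agree (l : List Char) :
    (∀ t : Int, pvLoopA l 0 t false = pvLoopB l t) ∧
    (∀ t : Int, pvLoopA l 1 t true =
      match pvAfterClose l with
      | none => -1
      | some r => pvLoopB r (t + 1)) := by
  induction l with
  | nil =>
    constructor
    · intro t; simp [pvLoopA, pvLoopB]
    · intro t; simp [pvLoopA, pvAfterClose]
  | cons c rest ih =>
    constructor
    · intro t
      by_cases hc : c = '('
      · subst hc
        rw [pvLoopB_cons_open]
        simp only [pvLoopA]
        norm_num
        exact ih.2 t
      · simp only [pvLoopA, pvLoopB, hc]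
        norm_num [hc]
        exact ih.1 t
    · intro t
      by_cases hc : c = ')'
      · subst hc
        simp only [pvLoopA, pvAfterClose]
        norm_num
        exact ih.1 (t + 1)
      · simp only [pvLoopA, pvAfterClose, hc]
        norm_num [hc]
        exact ih.2 t

-- ===== VERDICT (by name: the statement is the Claim_ definition above) =====
theorem flat_paren_counter_spec : Claim_equal_flat_paren_counter := by
  intro string _
  unfold Spec_flat_paren_counter flat_paren_counter flat_paren_counter_alt
  exact (pvLoop_agree string.toList).1 0
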